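-- pv_equiv track=rewrite | github.com/pypi-data/pypi-mirror-74 | packages/xlist/xlist-0.0.4.tar.gz/xlist-0.0.4/xlist/elist.py | replace_seqs
-- ===== SOURCE A (Python) =====
-- import copy
--
-- def replace_seqs(ol,value,indexes,**kwargs):
--     '''
--         from elist.elist import *
--         ol = [1,'a',3,'a',5,'a',6,'a']
--         id(ol)
--         new = replace_seqs(ol,'AAA',[1,3,7])
--         ol
--         new
--         id(ol)
--         id(new)
--         ####
--         ol = [1,'a',3,'a',5,'a',6,'a']
--         id(ol)
--         rslt = replace_seqs(ol,'AAA',[1,3,7],mode="original")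
--         ol
--         rslt
--         id(ol)
--         id(rslt)
--         #replace_indexes = replace_seqs
--     '''
--     if('mode' in kwargs):
--         mode = kwargs["mode"]
--     else:
--         mode = "new"
--     indexes = list(indexes)
--     new = []
--     length = ol.__len__()
--     cpol = copy.deepcopy(ol)
--     for i in range(0,length):
--         if(i in indexes):
--             new.append(value)
--         else:
--             new.append(cpol[i])
--     if(mode == "new"):
--         return(new)
--     else:
--         ol.clear()
--         ol.extend(new)
--         return(ol)
-- ===== SOURCE B (Python) =====
-- import copy
--
-- def replace_seqs(ol, value, indexes, **kwargs):
--     mode = kwargs["mode"] if "mode" in kwargs else "new"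
--     new = copy.deepcopy(ol)
--     length = len(ol)
--     for idx in list(indexes):
--         if 0 <= idx < length:
--             new[idx] = value
--     if mode == "new":
--         return new
--     ol.clear()
--     ol.extend(new)
--     return ol
-- ===== Notes on version B (the rewrite author's own statement) =====
-- stated objective: simpler
-- what changed: Instead of scanning every position of the list and testing membership in the index list, B copies the list once and writes the value directly at each in-range index.
import Mathlib
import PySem

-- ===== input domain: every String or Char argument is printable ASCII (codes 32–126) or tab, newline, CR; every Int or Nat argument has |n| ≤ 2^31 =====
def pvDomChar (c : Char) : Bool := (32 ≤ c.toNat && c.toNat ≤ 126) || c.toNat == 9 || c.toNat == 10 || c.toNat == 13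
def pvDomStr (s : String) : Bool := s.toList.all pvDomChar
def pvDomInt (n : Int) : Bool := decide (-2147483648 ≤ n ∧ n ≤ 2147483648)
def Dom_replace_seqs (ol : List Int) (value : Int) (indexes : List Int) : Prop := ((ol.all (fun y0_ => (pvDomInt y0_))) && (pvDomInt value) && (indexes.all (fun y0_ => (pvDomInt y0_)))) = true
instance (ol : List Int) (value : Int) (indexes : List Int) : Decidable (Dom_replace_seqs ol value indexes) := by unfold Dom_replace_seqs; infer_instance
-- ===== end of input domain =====

-- B writes `value` directly at each in-range index into a copy of the list instead of
-- scanning every position with a membership test (objective: simpler). Return value only: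
-- with mode="original" both Pythons mutate `ol` identically; kwargs is always absent here, mode = "new".

-- ===== PORT A =====
-- for i in range(0, length): new.append(value if i in indexes else cpol[i]); mode == "new" so new is returned
def replace_seqs (ol : List Int) (value : Int) (indexes : List Int) : List Int :=
  let length : Int := (ol.length : Int)
  let cpol := ol
  (PySem.List.pyRange 0 length 1).foldl
    (fun new i => new ++ [if i ∈ indexes then value else PySem.List.pyGetD cpol i 0]) []

-- ===== PORT B =====
-- new = deepcopy(ol); for idx in indexes: if 0 <= idx < length: new[idx] = value
def replace_seqs_alt (ol : List Int) (value : Int) (indexes : List Int) : List Int :=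
  let length : Int := (ol.length : Int)
  indexes.foldl
    (fun new idx => if 0 ≤ idx ∧ idx < length then new.set idx.toNat value else new) ol

-- ===== PRECONDITION & SPEC =====
def Spec_replace_seqs (ol : List Int) (value : Int) (indexes : List Int) (out : List Int) : Prop := out = replace_seqs_alt ol value indexes
instance (ol : List Int) (value : Int) (indexes : List Int) (out : List Int) : Decidable (Spec_replace_seqs ol value indexes out) := by unfold Spec_replace_seqs; infer_instance

-- ===== CLAIM (what is proved, stated in full; the proofs are below) =====
def Claim_equal_replace_seqs : Prop := ∀ (ol : List Int) (value : Int) (indexes : List Int), Dom_replace_seqs ol value indexes → Spec_replace_seqs ol value indexes (replace_seqs ol value indexes)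

-- ===== LEMMAS AND PROOFS =====

-- B's fold over the index list, characterised position by position.
theorem alt_foldl_eq_map (value : Int) (idxs : List Int) (n : Nat) (acc : List Int)
    (h : acc.length = n) :
    idxs.foldl (fun new idx => if 0 ≤ idx ∧ idx < (n : Int) then new.set idx.toNat value else new) acc
      = (List.range n).map (fun (j : Nat) => if ((j : Int) ∈ idxs) then value else acc.getD j 0) := by
  induction idxs generalizing acc with
  | nil =>
    simp only [List.foldl_nil, List.not_mem_nil, if_false]
    apply List.ext_getElem
    · simp [h]
    · intro j hj hj'
      have hja : j < acc.length := hj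
      simp only [List.getElem_map, List.getElem_range]
      exact (List.getD_eq_getElem acc 0 hja).symm
  | cons idx rest ih =>
    simp only [List.foldl_cons]
    set acc' : List Int := if 0 ≤ idx ∧ idx < (n : Int) then acc.set idx.toNat value else acc with hacc'
    have hlen' : acc'.length = n := by
      simp only [hacc']; split <;> simp [h]
    rw [ih acc' hlen']
    apply List.map_congr_left
    intro j hj
    have hjn : j < n := List.mem_range.mp hj
    by_cases hm : ((j : Int) ∈ rest)
    · simp [hm]
    · by_cases he : idx = (j : Int)
      · have hg : 0 ≤ idx ∧ idx < (n : Int) := by constructor <;> omega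
        have : acc' = acc.set idx.toNat value := by simp [hacc', hg]
        rw [this]
        have ht : idx.toNat = j := by omega
        simp only [hm, if_false, List.mem_cons, he, true_or, if_true]
        rw [List.getD_eq_getElem _ _ (by simp; omega)]
        exact List.getElem_set_self _
      · have hmem : ¬ ((j : Int) ∈ idx :: rest) := by
          intro hc
          rcases List.mem_cons.mp hc with hc | hc
          · exact he hc.symm
          · exact hm hc
        simp only [hm, if_false, hmem]
        simp only [hacc']
        split
        · rename_i hg
          have hne : idx.toNat ≠ j := by omega
          by_cases hjl : j < acc.length
          · rw [List.getD_eq_getElem _ _ (by simpa using hjl),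
                List.getD_eq_getElem _ _ hjl]
            exact List.getElem_set_ne hne _
          · rw [List.getD_eq_default _ _ (by simpa using Nat.le_of_not_lt hjl),
                List.getD_eq_default _ _ (Nat.le_of_not_lt hjl)]
        · rfl

-- ===== VERDICT (by name: the statement is the Claim_ definition above) =====
theorem replace_seqs_spec : Claim_equal_replace_seqs := by
  intro ol value indexes _
  unfold Spec_replace_seqs replace_seqs replace_seqs_alt
  simp only []
  rw [alt_foldl_eq_map value indexes ol.length ol rfl]
  rw [PySem.List.pyRange_zero_natCast ol.length]
  rw [List.foldl_map, PySem.List.foldl_append_singleton_eq_map]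
  simp only [List.nil_append]
  apply List.map_congr_left
  intro j hj
  simp [PySem.List.pyGetD_natCast]
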